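-- pv_equiv track=rewrite | github.com/genovationtech/triality | lib/triality/solvers/wellposedness.py | _is_pure_neumann
-- ===== SOURCE A (Python) =====
-- def _is_pure_neumann(bc, domain) -> bool:
--     """Check if all BCs are Neumann (flux) type"""
--     if not bc:
--         return False
--
--     # Check for flux-type BC keywords
--     flux_keywords = ['flux', 'neumann', 'derivative', 'grad']
--
--     # Check if any BC has flux keyword
--     has_flux = any(
--         any(keyword in str(key).lower() for keyword in flux_keywords)
--         for key in bc.keys()
--     )
--
--     # Check if NO Dirichlet (value) BCs are present
--     dirichlet_keywords = ['left', 'right', 'top', 'bottom', 'boundary']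
--     has_dirichlet = any(
--         any(keyword in str(key).lower() for keyword in dirichlet_keywords)
--         and 'flux' not in str(key).lower()
--         for key in bc.keys()
--     )
--
--     # Pure Neumann if: has flux BCs AND no Dirichlet BCs
--     return has_flux and not has_dirichlet
-- ===== SOURCE B (Python) =====
-- def _is_pure_neumann(bc, domain) -> bool:
--     """Early-exit state machine over one shared iterator: phase 1 scans until a
--     flux key is found (bailing out False at the first Dirichlet key); phase 2
--     consumes the remaining keys checking only that no Dirichlet key appears."""
--     flux_keywords = ('flux', 'neumann', 'derivative', 'grad')
--     dirichlet_keywords = ('left', 'right', 'top', 'bottom', 'boundary')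
--
--     def is_dirichlet(low):
--         return 'flux' not in low and any(kw in low for kw in dirichlet_keywords)
--
--     it = iter(bc)
--     for key in it:
--         low = str(key).lower()
--         if is_dirichlet(low):
--             return False
--         if any(kw in low for kw in flux_keywords):
--             # flux found, nothing Dirichlet so far: succeed iff rest is clean
--             return all(not is_dirichlet(str(k).lower()) for k in it)
--     return False
-- ===== Notes on version B (the rewrite author's own statement) =====
-- stated objective: alternative
-- what changed: Replaces A's two independent full any(...) scans (has_flux, has_dirichlet) with a short-circuiting two-phase state machine over a single shared iterator: it returns False at the first Dirichlet key, and once a flux key is found it only verifies that no Dirichlet key follows, never revisiting or fully re-scanning the keys.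
import Mathlib
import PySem

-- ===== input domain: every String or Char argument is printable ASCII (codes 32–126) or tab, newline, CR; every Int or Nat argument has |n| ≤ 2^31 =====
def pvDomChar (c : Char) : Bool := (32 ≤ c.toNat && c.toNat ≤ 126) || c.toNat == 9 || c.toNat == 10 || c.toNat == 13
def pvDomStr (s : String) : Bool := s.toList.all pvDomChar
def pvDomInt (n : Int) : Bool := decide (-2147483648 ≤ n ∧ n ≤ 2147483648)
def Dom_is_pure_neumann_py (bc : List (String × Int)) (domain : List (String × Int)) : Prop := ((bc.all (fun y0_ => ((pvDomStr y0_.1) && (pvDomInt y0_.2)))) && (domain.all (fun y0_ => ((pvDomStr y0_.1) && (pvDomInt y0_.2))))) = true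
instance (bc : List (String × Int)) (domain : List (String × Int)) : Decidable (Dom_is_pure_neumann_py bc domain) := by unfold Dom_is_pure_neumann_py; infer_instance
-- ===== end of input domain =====

-- B replaces A's two independent full scans with a short-circuiting two-phase
-- state machine over one pass of the keys (alternative decomposition, same cost).

-- ===== PORT A =====
def pyKeys (bc : List (String × Int)) : List String := (PySem.Dict.mk bc).keys

def fluxKeywords : List String := ["flux", "neumann", "derivative", "grad"]
def dirichletKeywords : List String := ["left", "right", "top", "bottom", "boundary"]

def is_pure_neumann_py (bc : List (String × Int)) (domain : List (String × Int)) : Bool :=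
  if bc.isEmpty then false
  else
    let has_flux := (pyKeys bc).any (fun key =>
      fluxKeywords.any (fun kw => PySem.Str.isIn kw (PySem.Str.lower key)))
    let has_dirichlet := (pyKeys bc).any (fun key =>
      dirichletKeywords.any (fun kw => PySem.Str.isIn kw (PySem.Str.lower key))
        && !(PySem.Str.isIn "flux" (PySem.Str.lower key)))
    has_flux && !has_dirichlet

-- ===== PORT B =====
-- 'flux' not in low and any(kw in low for kw in dirichlet_keywords)
def isDirichletLow (low : String) : Bool :=
  !(PySem.Str.isIn "flux" low) && dirichletKeywords.any (fun kw => PySem.Str.isIn kw low)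

-- phase 2: all(not is_dirichlet(str(k).lower()) for k in it)
def restClean (keys : List String) : Bool :=
  keys.all (fun k => !isDirichletLow (PySem.Str.lower k))

-- phase 1: the for-loop over the shared iterator
def seekFlux : List String → Bool
  | [] => false
  | key :: rest =>
    let low := PySem.Str.lower key
    if isDirichletLow low then false
    else if fluxKeywords.any (fun kw => PySem.Str.isIn kw low) then restClean rest
    else seekFlux rest

def is_pure_neumann_py_alt (bc : List (String × Int)) (domain : List (String × Int)) : Bool :=
  seekFlux (pyKeys bc)

-- ===== PRECONDITION & SPEC =====
def Spec_is_pure_neumann_py (bc : List (String × Int)) (domain : List (String × Int)) (out : Bool) : Prop := out = is_pure_neumann_py_alt bc domain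
instance (bc : List (String × Int)) (domain : List (String × Int)) (out : Bool) : Decidable (Spec_is_pure_neumann_py bc domain out) := by unfold Spec_is_pure_neumann_py; infer_instance

-- ===== CLAIM (what is proved, stated in full; the proofs are below) =====
def Claim_equal_is_pure_neumann_py : Prop := ∀ (bc : List (String × Int)) (domain : List (String × Int)), Dom_is_pure_neumann_py bc domain → Spec_is_pure_neumann_py bc domain (is_pure_neumann_py bc domain)

-- ===== LEMMAS AND PROOFS =====
theorem isDirichletLow_comm (s : String) :
    isDirichletLow s =
      (dirichletKeywords.any (fun kw => PySem.Str.isIn kw s) && !(PySem.Str.isIn "flux" s)) := by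
  simp only [isDirichletLow]; exact Bool.and_comm _ _

theorem restClean_eq (rest : List String) :
    restClean rest =
      !(rest.any (fun key => dirichletKeywords.any (fun kw => PySem.Str.isIn kw (PySem.Str.lower key))
          && !(PySem.Str.isIn "flux" (PySem.Str.lower key)))) := by
  induction rest with
  | nil => rfl
  | cons k r ih =>
    simp only [restClean, List.all_cons, List.any_cons] at *
    rw [← isDirichletLow_comm, ih]
    cases isDirichletLow (PySem.Str.lower k) <;> simp

theorem seekFlux_eq (keys : List String) :
    seekFlux keys =
      ((keys.any (fun key => fluxKeywords.any (fun kw => PySem.Str.isIn kw (PySem.Str.lower key))))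
        && !(keys.any (fun key => dirichletKeywords.any (fun kw => PySem.Str.isIn kw (PySem.Str.lower key))
              && !(PySem.Str.isIn "flux" (PySem.Str.lower key))))) := by
  induction keys with
  | nil => rfl
  | cons k rest ih =>
    simp only [seekFlux, List.any_cons]
    rw [restClean_eq, ih, ← isDirichletLow_comm]
    generalize isDirichletLow (PySem.Str.lower k) = d
    generalize fluxKeywords.any (fun kw => PySem.Str.isIn kw (PySem.Str.lower k)) = f
    generalize rest.any (fun key => fluxKeywords.any (fun kw => PySem.Str.isIn kw (PySem.Str.lower key))) = rf
    generalize rest.any (fun key => dirichletKeywords.any (fun kw => PySem.Str.isIn kw (PySem.Str.lower key))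
          && !(PySem.Str.isIn "flux" (PySem.Str.lower key))) = rd
    cases d <;> cases f <;> cases rf <;> cases rd <;> rfl

theorem pyKeys_nil_iff (bc : List (String × Int)) : bc.isEmpty → pyKeys bc = [] := by
  intro h
  cases bc with
  | nil => rfl
  | cons _ _ => simp [List.isEmpty] at h

-- ===== VERDICT (by name: the statement is the Claim_ definition above) =====
theorem is_pure_neumann_py_spec : Claim_equal_is_pure_neumann_py := by
  intro bc domain _
  unfold Spec_is_pure_neumann_py is_pure_neumann_py is_pure_neumann_py_alt
  split_ifs with h
  · rw [pyKeys_nil_iff bc h]; rfl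
  · rw [seekFlux_eq]
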